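-- pv_equiv track=rewrite | github.com/paulomiguel05/catalogo_facil | catalogo_facil/app/utils/sorting.py | toggle_sort
-- ===== SOURCE A (Python) =====
-- def parse_sort(sort_string):
--     sort_items = []
--     sort_map = {}
--
--     if not sort_string:
--         return sort_items, sort_map
--
--     for item in sort_string.split(','):
--         item = item.strip()
--         if not item or ':' not in item:
--             continue
--
--         campo, direcao = item.split(':', 1)
--         campo = campo.strip()
--         direcao = direcao.strip().lower()
--
--         if campo not in ['ativo', 'categoria','data', 'estoque', 'nome', 'nome_cliente', 'pagamentos','preco', 'p_custo', "lucro", 'total', 'status']: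
--             continue
--
--         if direcao not in ['asc', 'desc']:
--             direcao = 'asc'
--
--         if campo not in sort_map:
--             sort_items.append((campo, direcao))
--             sort_map[campo] = direcao
--
--     return sort_items, sort_map
--
-- def toggle_sort(sort_string, campo):
--     sort_items, sort_map = parse_sort(sort_string)
--
--     novos = []
--     campo_encontrado = False
--
--     for campo_atual, direcao_atual in sort_items:
--         if campo_atual == campo:
--             campo_encontrado = True
--             nova_direcao = 'desc' if direcao_atual == 'asc' else 'asc'
--             novos.append((campo_atual, nova_direcao))
--         else:
--             novos.append((campo_atual, direcao_atual))
--
--     if not campo_encontrado: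
--         novos.append((campo, 'asc'))
--
--     return ','.join(f'{campo}:{direcao}' for campo, direcao in novos)
-- ===== SOURCE B (Python) =====
-- _FIELDS = {'ativo', 'categoria', 'data', 'estoque', 'nome', 'nome_cliente',
--            'pagamentos', 'preco', 'p_custo', 'lucro', 'total', 'status'}
--
--
-- def toggle_sort(sort_string, campo):
--     parts = []
--     seen = set()
--     found = False
--     for item in sort_string.split(','):
--         if ':' not in item:
--             continue
--         f, d = item.split(':', 1)
--         f = f.strip()
--         if f not in _FIELDS or f in seen:
--             continue
--         seen.add(f)
--         d = d.strip().lower()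
--         if d != 'desc':
--             d = 'asc'
--         if f == campo:
--             found = True
--             d = 'asc' if d == 'desc' else 'desc'
--         parts.append(f + ':' + d)
--     if not found:
--         parts.append(campo + ':asc')
--     return ','.join(parts)
-- ===== Notes on version B (the rewrite author's own statement) =====
-- stated objective: simpler
-- what changed: Fused A's separate parse_sort pass (building a (campo,direcao) list plus a dict for dedup) and its rebuild/toggle loop into one single pass over the split items that dedups with a set, toggles the target field inline, and emits the rendered 'campo:direcao' strings directly.
import Mathlib
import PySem

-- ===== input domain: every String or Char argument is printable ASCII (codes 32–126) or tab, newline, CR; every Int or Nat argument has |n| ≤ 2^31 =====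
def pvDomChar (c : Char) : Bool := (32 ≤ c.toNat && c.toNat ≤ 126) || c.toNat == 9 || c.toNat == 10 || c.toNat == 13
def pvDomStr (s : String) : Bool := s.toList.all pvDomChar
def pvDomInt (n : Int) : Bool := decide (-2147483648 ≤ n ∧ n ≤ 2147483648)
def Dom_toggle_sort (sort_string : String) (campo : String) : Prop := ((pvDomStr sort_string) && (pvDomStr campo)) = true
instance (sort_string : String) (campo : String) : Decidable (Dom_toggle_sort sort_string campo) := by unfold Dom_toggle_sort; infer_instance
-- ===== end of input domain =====

-- B fuses A's two passes (parse_sort building a list+dict, then a rebuild loop) into a single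
-- pass over the split items that toggles inline, tracks seen fields with a set, and emits the
-- rendered 'campo:direcao' strings directly; objective: simpler.

-- ===== PORT A =====
-- whitelist literal from parse_sort
def pvFieldsA : List String :=
  ["ativo", "categoria", "data", "estoque", "nome", "nome_cliente", "pagamentos",
   "preco", "p_custo", "lucro", "total", "status"]

-- the body of parse_sort's for-loop
def pvStepParse (st : List (String × String) × PySem.Dict String String) (raw : String) :
    List (String × String) × PySem.Dict String String :=
  let item := PySem.Str.strip raw
  if item = "" ∨ PySem.Str.isIn ":" item = false then st
  else
    match PySem.Str.splitMax? item ":" 1 with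
    | some (c0 :: d0 :: _) =>
      let campo := PySem.Str.strip c0
      let direcao := PySem.Str.lower (PySem.Str.strip d0)
      if campo ∉ pvFieldsA then st
      else
        let direcao := if direcao ∉ (["asc", "desc"] : List String) then "asc" else direcao
        if PySem.Dict.contains st.2 campo then st
        else (st.1 ++ [(campo, direcao)], PySem.Dict.insert st.2 campo direcao)
    | _ => st  -- unreachable: ':' ∈ item guarantees two pieces

def parse_sort (sort_string : String) :
    List (String × String) × PySem.Dict String String :=
  if sort_string = "" then ([], PySem.Dict.mk [])
  else ((PySem.Str.split? sort_string ",").getD []).foldl pvStepParse ([], PySem.Dict.mk [])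

-- the body of toggle_sort's for-loop
def pvStepToggle (campo : String) (st : List (String × String) × Bool) (p : String × String) :
    List (String × String) × Bool :=
  if p.1 = campo then (st.1 ++ [(p.1, if p.2 = "asc" then "desc" else "asc")], true)
  else (st.1 ++ [p], st.2)

def toggle_sort (sort_string : String) (campo : String) : String :=
  let parsed := parse_sort sort_string
  let st := parsed.1.foldl (pvStepToggle campo) ([], false)
  let novos := if st.2 then st.1 else st.1 ++ [(campo, "asc")]
  PySem.Str.join "," (novos.map (fun p => p.1 ++ ":" ++ p.2))

-- ===== PORT B =====
def pvFieldsB : PySem.Set String :=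
  PySem.Set.ofList
    ["ativo", "categoria", "data", "estoque", "nome", "nome_cliente", "pagamentos",
     "preco", "p_custo", "lucro", "total", "status"]

-- the body of B's single for-loop; state = (parts, seen, found)
def pvStepAlt (campo : String) (st : List String × PySem.Set String × Bool) (raw : String) :
    List String × PySem.Set String × Bool :=
  let item := PySem.Str.strip raw
  if PySem.Str.isIn ":" item = false then st
  else
    match PySem.Str.splitMax? item ":" 1 with
    | some (f0 :: d0 :: _) =>
      let f := PySem.Str.strip f0
      if PySem.Set.contains pvFieldsB f = false ∨ PySem.Set.contains st.2.1 f = true then st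
      else
        let seen := PySem.Set.add st.2.1 f
        let d := PySem.Str.lower (PySem.Str.strip d0)
        let d := if d ≠ "desc" then "asc" else d
        if f = campo then
          (st.1 ++ [f ++ ":" ++ (if d = "desc" then "asc" else "desc")], seen, true)
        else (st.1 ++ [f ++ ":" ++ d], seen, st.2.2)
    | _ => st  -- unreachable: ':' ∈ item guarantees two pieces

def toggle_sort_alt (sort_string : String) (campo : String) : String :=
  let st := ((PySem.Str.split? sort_string ",").getD []).foldl (pvStepAlt campo)
      ([], PySem.Set.empty, false)
  let parts := if st.2.2 then st.1 else st.1 ++ [campo ++ ":asc"]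
  PySem.Str.join "," parts

-- ===== PRECONDITION & SPEC =====
def Spec_toggle_sort (sort_string : String) (campo : String) (out : String) : Prop := out = toggle_sort_alt sort_string campo
instance (sort_string : String) (campo : String) (out : String) : Decidable (Spec_toggle_sort sort_string campo out) := by unfold Spec_toggle_sort; infer_instance

-- ===== CLAIM (what is proved, stated in full; the proofs are below) =====
def Claim_equal_toggle_sort : Prop := ∀ (sort_string : String) (campo : String), Dom_toggle_sort sort_string campo → Spec_toggle_sort sort_string campo (toggle_sort sort_string campo)

-- ===== LEMMAS AND PROOFS =====

-- rendering helpers used only by the proofs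
def pvFlipA (d : String) : String := if d = "asc" then "desc" else "asc"

def pvMapA (campo : String) (p : String × String) : String × String :=
  if p.1 = campo then (p.1, pvFlipA p.2) else p

def pvRenderB (campo : String) (p : String × String) : String :=
  p.1 ++ ":" ++ (if p.1 = campo then (if p.2 = "desc" then "asc" else "desc") else p.2)

def pvDirOK (items : List (String × String)) : Prop :=
  ∀ p ∈ items, p.2 = "asc" ∨ p.2 = "desc"

lemma pv_append_str (a : String) : a ++ ":" ++ "asc" = a ++ ":asc" := by
  rw [String.append_assoc]; rfl

-- A's second loop is 'map + any'
lemma pv_fold_toggle (campo : String) (items : List (String × String))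
    (acc : List (String × String)) (b : Bool) :
    items.foldl (pvStepToggle campo) (acc, b) =
      (acc ++ items.map (pvMapA campo), b || decide (campo ∈ items.map Prod.fst)) := by
  induction items generalizing acc b with
  | nil => simp
  | cons p ps ih =>
    by_cases h : p.1 = campo
    · simp [pvStepToggle, pvMapA, pvFlipA, h, ih]
    · simp only [List.foldl_cons, pvStepToggle, if_neg h, ih, List.map_cons, pvMapA,
                 List.cons_append, List.nil_append, List.append_assoc]
      rw [Prod.mk.injEq]
      refine ⟨rfl, ?_⟩
      have hiff : campo ∈ p.1 :: List.map Prod.fst ps ↔ campo ∈ List.map Prod.fst ps :=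
        ⟨fun hm => (List.mem_cons.mp hm).resolve_left (fun e => h e.symm),
         List.mem_cons_of_mem _⟩
      rw [decide_eq_decide.mpr hiff]

lemma pv_dir_eq (d : String) : (if d ∉ (["asc","desc"] : List String) then "asc" else d) = (if d ≠ "desc" then "asc" else d) := by
  by_cases h1 : d = "desc"
  · simp [h1]
  · by_cases h2 : d = "asc" <;> simp [h1, h2]
lemma pv_dir_ok (d : String) : (if d ∉ (["asc","desc"] : List String) then "asc" else d) = "asc" ∨ (if d ∉ (["asc","desc"] : List String) then "asc" else d) = "desc" := by
  by_cases h1 : d = "desc"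
  · simp [h1]
  · by_cases h2 : d = "asc" <;> simp [h1, h2]

lemma pv_step_core (campo f dir : String) (items : List (String × String))
    (map : PySem.Dict String String) (hmap : map.items = items) (hdir : pvDirOK items) :
    (if f ∉ pvFieldsA then (items, map)
     else
       if map.contains f = true then (items, map)
       else
         (items ++ [(f, if dir ∉ (["asc", "desc"] : List String) then "asc" else dir)],
          map.insert f (if dir ∉ (["asc", "desc"] : List String) then "asc" else dir))).2.items
      = (if f ∉ pvFieldsA then (items, map)
         else
           if map.contains f = true then (items, map)
           else
             (items ++ [(f, if dir ∉ (["asc", "desc"] : List String) then "asc" else dir)],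
              map.insert f (if dir ∉ (["asc", "desc"] : List String) then "asc" else dir))).1 ∧
    pvDirOK
      (if f ∉ pvFieldsA then (items, map)
       else
         if map.contains f = true then (items, map)
         else
           (items ++ [(f, if dir ∉ (["asc", "desc"] : List String) then "asc" else dir)],
            map.insert f (if dir ∉ (["asc", "desc"] : List String) then "asc" else dir))).1 ∧
    (if pvFieldsB.contains f = false ∨ PySem.Set.contains (List.map Prod.fst items) f = true then
       (List.map (pvRenderB campo) items, List.map Prod.fst items, decide (campo ∈ List.map Prod.fst items))
     else
       if f = campo then
         (List.map (pvRenderB campo) items ++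
            [f ++ ":" ++ if (if dir ≠ "desc" then "asc" else dir) = "desc" then "asc" else "desc"],
          PySem.Set.add (List.map Prod.fst items) f, true)
       else
         (List.map (pvRenderB campo) items ++ [f ++ ":" ++ if dir ≠ "desc" then "asc" else dir],
          PySem.Set.add (List.map Prod.fst items) f, decide (campo ∈ List.map Prod.fst items)))
    = (List.map (pvRenderB campo)
        (if f ∉ pvFieldsA then (items, map)
         else
           if map.contains f = true then (items, map)
           else
             (items ++ [(f, if dir ∉ (["asc", "desc"] : List String) then "asc" else dir)],
              map.insert f (if dir ∉ (["asc", "desc"] : List String) then "asc" else dir))).1,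
       List.map Prod.fst
        (if f ∉ pvFieldsA then (items, map)
         else
           if map.contains f = true then (items, map)
           else
             (items ++ [(f, if dir ∉ (["asc", "desc"] : List String) then "asc" else dir)],
              map.insert f (if dir ∉ (["asc", "desc"] : List String) then "asc" else dir))).1,
       decide (campo ∈ List.map Prod.fst
        (if f ∉ pvFieldsA then (items, map)
         else
           if map.contains f = true then (items, map)
           else
             (items ++ [(f, if dir ∉ (["asc", "desc"] : List String) then "asc" else dir)],
              map.insert f (if dir ∉ (["asc", "desc"] : List String) then "asc" else dir))).1)) := by
  by_cases hf : f ∈ pvFieldsA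
  · have hcb : PySem.Set.contains pvFieldsB f = true := by
      rw [PySem.Set.contains_iff]; rw [pvFieldsB, PySem.Set.mem_ofList]; exact hf
    by_cases hc : f ∈ items.map Prod.fst
    · have hdc : PySem.Dict.contains map f = true := by
        rw [PySem.Dict.contains_eq_decide_mem_keys]
        simp [PySem.Dict.keys, hmap, hc]
      have hsc : PySem.Set.contains (items.map Prod.fst) f = true := by
        rw [PySem.Set.contains_iff]; exact hc
      simp only [if_neg (not_not_intro hf), if_pos hdc, if_pos (Or.inr hsc)]
      exact ⟨hmap, hdir, by trivial⟩
    · have hdc : PySem.Dict.contains map f = false := by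
        rw [PySem.Dict.contains_eq_decide_mem_keys]
        simp [PySem.Dict.keys, hmap, hc]
      have hsc : PySem.Set.contains (items.map Prod.fst) f = false := by
        rw [Bool.eq_false_iff]; intro h; rw [PySem.Set.contains_iff] at h; exact hc h
      have hadd : PySem.Set.add (items.map Prod.fst) f = items.map Prod.fst ++ [f] := by
        rw [PySem.Set.add, hsc]; simp
      have hnor : ¬ (PySem.Set.contains pvFieldsB f = false ∨ PySem.Set.contains (items.map Prod.fst) f = true) := by
        intro h; rcases h with h | h
        · rw [hcb] at h; cases h
        · rw [hsc] at h; cases h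
      simp only [if_neg (not_not_intro hf), if_neg (by simp [hdc] : ¬ (PySem.Dict.contains map f = true)),
          if_neg hnor]
      have hAB := pv_dir_eq dir
      refine ⟨?_, ?_, ?_⟩
      · rw [PySem.Dict.items_insert_of_not_contains _ _ hdc, hmap]
      · intro p hp
        rcases List.mem_append.mp hp with h | h
        · exact hdir p h
        · simp only [List.mem_singleton] at h; rw [h]; exact pv_dir_ok _
      · rw [hadd]
        by_cases hfc : f = campo
        · simp [hfc, pvRenderB, ← hAB, List.map_append]
        · simp [hfc, pvRenderB, ← hAB, List.map_append]
          exact fun e => absurd e.symm hfc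
  · have hcb : PySem.Set.contains pvFieldsB f = false := by
      rw [Bool.eq_false_iff]; intro h
      exact hf (by rw [PySem.Set.contains_iff, pvFieldsB, PySem.Set.mem_ofList] at h; exact h)
    simp only [if_pos hf, if_pos (Or.inl hcb)]
    exact ⟨hmap, hdir, by trivial⟩

set_option maxHeartbeats 1000000 in
lemma pv_step_sim (campo raw : String) (items : List (String × String))
    (map : PySem.Dict String String) (hmap : map.items = items) (hdir : pvDirOK items) :
    (pvStepParse (items, map) raw).2.items = (pvStepParse (items, map) raw).1 ∧
    pvDirOK (pvStepParse (items, map) raw).1 ∧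
    pvStepAlt campo (items.map (pvRenderB campo), items.map Prod.fst,
        decide (campo ∈ items.map Prod.fst)) raw
      = ((pvStepParse (items, map) raw).1.map (pvRenderB campo),
         (pvStepParse (items, map) raw).1.map Prod.fst,
         decide (campo ∈ (pvStepParse (items, map) raw).1.map Prod.fst)) := by
  unfold pvStepParse pvStepAlt
  by_cases hin : PySem.Str.isIn ":" (PySem.Str.strip raw) = true
  · have hne : ¬ (PySem.Str.strip raw = "") := by
      intro h; rw [h] at hin; exact absurd hin (by decide)
    have hinC : PySem.Chars.isIn [':'] (PySem.Chars.strip raw.toList) = true := by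
      simpa using hin
    rw [if_neg (by simp [hne, hinC] : ¬ (PySem.Str.strip raw = "" ∨ PySem.Str.isIn ":" (PySem.Str.strip raw) = false)),
        if_neg (by simp [hinC] : ¬ (PySem.Str.isIn ":" (PySem.Str.strip raw) = false))]
    generalize PySem.Str.splitMax? (PySem.Str.strip raw) ":" 1 = x
    match x with
    | none => exact ⟨hmap, hdir, rfl⟩
    | some [] => exact ⟨hmap, hdir, rfl⟩
    | some [c0] => exact ⟨hmap, hdir, rfl⟩
    | some (c0 :: d0 :: rest) =>
      exact pv_step_core campo (PySem.Str.strip c0) (PySem.Str.lower (PySem.Str.strip d0)) items map hmap hdir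
  · have hin' : PySem.Str.isIn ":" (PySem.Str.strip raw) = false := by
      rwa [Bool.not_eq_true] at hin
    simp only [if_pos (Or.inr hin'), if_pos hin']
    exact ⟨hmap, hdir, by trivial⟩

lemma pv_fold_sim (campo : String) (raws : List String) (items : List (String × String))
    (map : PySem.Dict String String) (hmap : map.items = items) (hdir : pvDirOK items) :
    (raws.foldl pvStepParse (items, map)).2.items = (raws.foldl pvStepParse (items, map)).1 ∧
    pvDirOK (raws.foldl pvStepParse (items, map)).1 ∧
    raws.foldl (pvStepAlt campo) (items.map (pvRenderB campo), items.map Prod.fst,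
        decide (campo ∈ items.map Prod.fst))
      = ((raws.foldl pvStepParse (items, map)).1.map (pvRenderB campo),
         (raws.foldl pvStepParse (items, map)).1.map Prod.fst,
         decide (campo ∈ (raws.foldl pvStepParse (items, map)).1.map Prod.fst)) := by
  induction raws generalizing items map with
  | nil => exact ⟨hmap, hdir, rfl⟩
  | cons r rs ih =>
    obtain ⟨h1, h2, h3⟩ := pv_step_sim campo r items map hmap hdir
    have := ih (pvStepParse (items, map) r).1 (pvStepParse (items, map) r).2 h1 h2
    simp only [List.foldl_cons, h3]
    convert this using 2

-- the rendered toggled list coincides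
lemma pv_render_eq (campo : String) (items : List (String × String)) (hdir : pvDirOK items) :
    (items.map (pvMapA campo)).map (fun p => p.1 ++ ":" ++ p.2)
      = items.map (pvRenderB campo) := by
  rw [List.map_map]
  apply List.map_congr_left
  intro p hp
  rcases hdir p hp with h | h <;>
    by_cases hfc : p.1 = campo <;>
      simp [pvMapA, pvFlipA, pvRenderB, hfc, h, Function.comp]

-- the common assembly after the loops
lemma pv_main (campo : String) (raws : List String) :
    PySem.Str.join ","
      ((if ((raws.foldl pvStepParse ([], PySem.Dict.mk [])).1.foldl (pvStepToggle campo) ([], false)).2 then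
          ((raws.foldl pvStepParse ([], PySem.Dict.mk [])).1.foldl (pvStepToggle campo) ([], false)).1
        else
          ((raws.foldl pvStepParse ([], PySem.Dict.mk [])).1.foldl (pvStepToggle campo) ([], false)).1
            ++ [(campo, "asc")]).map (fun p => p.1 ++ ":" ++ p.2))
    = PySem.Str.join ","
        (if (raws.foldl (pvStepAlt campo) ([], PySem.Set.empty, false)).2.2 then
          (raws.foldl (pvStepAlt campo) ([], PySem.Set.empty, false)).1
        else (raws.foldl (pvStepAlt campo) ([], PySem.Set.empty, false)).1 ++ [campo ++ ":asc"]) := by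
  obtain ⟨h1, h2, h3⟩ := pv_fold_sim campo raws [] (PySem.Dict.mk []) rfl (by intro p hp; cases hp)
  have h3' : raws.foldl (pvStepAlt campo) ([], PySem.Set.empty, false)
      = ((raws.foldl pvStepParse ([], PySem.Dict.mk [])).1.map (pvRenderB campo),
         (raws.foldl pvStepParse ([], PySem.Dict.mk [])).1.map Prod.fst,
         decide (campo ∈ (raws.foldl pvStepParse ([], PySem.Dict.mk [])).1.map Prod.fst)) := h3
  rw [h3', pv_fold_toggle]
  set items := (raws.foldl pvStepParse ([], PySem.Dict.mk [])).1 with hitems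
  by_cases hm : campo ∈ items.map Prod.fst
  · simp only [hm, decide_true, if_true, List.nil_append, Bool.or_true]
    rw [pv_render_eq campo items h2]
  · simp only [hm, decide_false, Bool.false_eq_true, if_false, List.nil_append, Bool.or_false]
    rw [List.map_append, pv_render_eq campo items h2]
    simp [pv_append_str]

-- ===== VERDICT (by name: the statement is the Claim_ definition above) =====
theorem toggle_sort_spec : Claim_equal_toggle_sort := by
  intro s campo _
  unfold Spec_toggle_sort toggle_sort toggle_sort_alt parse_sort
  by_cases hs : s = ""
  · subst hs
    have hsplit : (PySem.Str.split? "" ",").getD [] = [""] := by decide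
    have hstep : pvStepAlt campo ([], PySem.Set.empty, false) ""
        = ([], PySem.Set.empty, false) := by
      unfold pvStepAlt
      rw [if_pos (by decide : PySem.Str.isIn ":" (PySem.Str.strip "") = false)]
    simp only [hsplit, List.foldl_cons, hstep, List.foldl]
    simp [pv_append_str]
  · simp only [if_neg hs]
    exact pv_main campo ((PySem.Str.split? s ",").getD [])
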